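-- pv_equiv track=rewrite | github.com/zibochen6/demo_deploy_on_jetson | pc_server/app/main.py | _parse_marker
-- ===== SOURCE A (Python) =====
-- def _parse_marker(text: str) -> tuple[str | None, str | None]:
--     installed_at = None
--     version = None
--     for line in text.splitlines():
--         if "=" not in line:
--             continue
--         key, value = line.split("=", 1)
--         key = key.strip().lower()
--         value = value.strip()
--         if key == "installed_at":
--             installed_at = value
--         elif key == "version":
--             version = value
--     return installed_at, version
-- ===== SOURCE B (Python) =====
-- def _parse_marker(text: str) -> tuple[str | None, str | None]:
--     def find_last(wanted):
--         # scan the lines back-to-front; the first match seen is the last occurrence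
--         for line in reversed(text.splitlines()):
--             if "=" not in line:
--                 continue
--             key, value = line.split("=", 1)
--             if key.strip().lower() == wanted:
--                 return value.strip()
--         return None
--     return find_last("installed_at"), find_last("version")
-- ===== Notes on version B (the rewrite author's own statement) =====
-- stated objective: alternative
-- what changed: B replaces A's single forward pass with two last-wins accumulator variables by two staged back-to-front scans, one per wanted key, each returning the first match found in the reversed line list (early exit), which equals the last occurrence forward.
import Mathlib
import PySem

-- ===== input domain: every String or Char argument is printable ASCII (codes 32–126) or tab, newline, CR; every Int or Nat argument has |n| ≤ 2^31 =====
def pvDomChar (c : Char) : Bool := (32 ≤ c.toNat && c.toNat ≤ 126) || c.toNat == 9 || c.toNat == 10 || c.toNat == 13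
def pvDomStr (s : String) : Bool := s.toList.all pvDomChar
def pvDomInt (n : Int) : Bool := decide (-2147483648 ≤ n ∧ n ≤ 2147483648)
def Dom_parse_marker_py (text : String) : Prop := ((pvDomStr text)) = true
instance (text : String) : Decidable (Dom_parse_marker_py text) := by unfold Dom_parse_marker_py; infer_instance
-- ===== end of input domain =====

-- B scans the lines back-to-front, once per wanted key, returning the first match (= last occurrence forward); alternative decomposition, same cost.


-- ===== PORT A =====
-- one loop iteration of A: skip lines without '=', else split once and update the matching variable
def parseMarkerStepA (st : Option String × Option String) (line : String) :
    Option String × Option String :=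
  if PySem.Str.isIn "=" line = false then st
  else
    match PySem.Str.splitMax? line "=" 1 with
    | some [k, v] =>
      let key := PySem.Str.lower (PySem.Str.strip k)
      let value := PySem.Str.strip v
      if key = "installed_at" then (some value, st.2)
      else if key = "version" then (st.1, some value)
      else st
    | _ => st  -- unreachable: with '=' in line, split("=", 1) yields exactly two pieces

def parse_marker_py (text : String) : Option String × Option String :=
  (PySem.Str.splitlines text).foldl parseMarkerStepA (none, none)

-- ===== PORT B =====
-- B's inner helper: scan a (reversed) list of lines, return the first matching value
def findLastKey (wanted : String) : List String → Option String
  | [] => none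
  | line :: rest =>
    if PySem.Str.isIn "=" line = false then findLastKey wanted rest
    else
      match PySem.Str.splitMax? line "=" 1 with
      | some [k, v] =>
        if PySem.Str.lower (PySem.Str.strip k) = wanted then some (PySem.Str.strip v)
        else findLastKey wanted rest
      | _ => findLastKey wanted rest  -- unreachable: with '=' in line, split yields two pieces

def parse_marker_py_alt (text : String) : Option String × Option String :=
  (findLastKey "installed_at" (PySem.Str.splitlines text).reverse,
   findLastKey "version" (PySem.Str.splitlines text).reverse)

-- ===== PRECONDITION & SPEC =====
def Spec_parse_marker_py (text : String) (out : Option String × Option String) : Prop := out = parse_marker_py_alt text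
instance (text : String) (out : Option String × Option String) : Decidable (Spec_parse_marker_py text out) := by unfold Spec_parse_marker_py; infer_instance

-- ===== CLAIM (what is proved, stated in full; the proofs are below) =====
def Claim_equal_parse_marker_py : Prop := ∀ (text : String), Dom_parse_marker_py text → Spec_parse_marker_py text (parse_marker_py text)

-- ===== LEMMAS AND PROOFS =====

-- findLastKey distributes over append as a left-biased Option.or
theorem findLastKey_append (w : String) (xs ys : List String) :
    findLastKey w (xs ++ ys) = (findLastKey w xs).or (findLastKey w ys) := by
  induction xs with
  | nil => simp [findLastKey]
  | cons l rest ih =>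
    simp only [List.cons_append, findLastKey]
    cases h : PySem.Str.isIn "=" l with
    | false => simpa [h] using ih
    | true =>
      simp only [Bool.true_eq_false, if_false]
      match hs : PySem.Str.splitMax? l "=" 1 with
      | none => simpa using ih
      | some [] => simpa using ih
      | some [k] => simpa using ih
      | some (k :: v :: u :: r) => simpa using ih
      | some [k, v] =>
        by_cases hw : PySem.Str.lower (PySem.Str.strip k) = w
        · simp [hw]
        · simpa [hw] using ih

-- one step of A equals the single-line reversed lookups or-ed with the incoming state
theorem findLastKey_single (st : Option String × Option String) (l : String) :
    parseMarkerStepA st l =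
      ((findLastKey "installed_at" [l]).or st.1, (findLastKey "version" [l]).or st.2) := by
  unfold parseMarkerStepA findLastKey
  cases h : PySem.Str.isIn "=" l with
  | false => simp [findLastKey]
  | true =>
    match hs : PySem.Str.splitMax? l "=" 1 with
    | none => simp [findLastKey]
    | some [] => simp [findLastKey]
    | some [k] => simp [findLastKey]
    | some (k :: v :: u :: r) => simp [findLastKey]
    | some [k, v] =>
      by_cases hi : PySem.Str.lower (PySem.Str.strip k) = "installed_at"
      · simp [hi, findLastKey]
      · by_cases hv : PySem.Str.lower (PySem.Str.strip k) = "version"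
        · simp [hv, findLastKey]
        · simp [hi, hv, findLastKey]

-- loop invariant: A's fold from state st = B's reversed first-match, or-ed with st
theorem parseMarker_fold_eq (lines : List String) (st : Option String × Option String) :
    lines.foldl parseMarkerStepA st =
      ((findLastKey "installed_at" lines.reverse).or st.1,
       (findLastKey "version" lines.reverse).or st.2) := by
  induction lines generalizing st with
  | nil => simp [findLastKey]
  | cons l rest ih =>
    simp only [List.foldl_cons, List.reverse_cons]
    rw [ih (parseMarkerStepA st l), findLastKey_single st l,
        findLastKey_append _ _ [l], findLastKey_append _ _ [l]]
    simp [Option.or_assoc]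

-- ===== VERDICT (by name: the statement is the Claim_ definition above) =====
theorem parse_marker_py_spec : Claim_equal_parse_marker_py := by
  intro text _
  show parse_marker_py text = parse_marker_py_alt text
  unfold parse_marker_py parse_marker_py_alt
  simp [parseMarker_fold_eq]
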